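-- pv_equiv track=rewrite | github.com/nesi73/advent_of_code | 2024/day3/part2.py | get_outside_warning_zones
-- ===== SOURCE A (Python) =====
-- def get_outside_warning_zones(mul: dict, warning_list: list)->list:
--     final = []
--
--     for m in mul:
--         correct = True
--         for w_l in warning_list:
--             if mul[m][0] > w_l[0] and mul[m][0] < w_l[1]:
--                 correct = False
--                 break
--         if correct:
--             final.append(m)
--     return final
-- ===== SOURCE B (Python) =====
-- def _bisect_left(starts, x):
--     lo, hi = 0, len(starts)
--     while lo < hi:
--         mid = (lo + hi) // 2
--         if starts[mid] < x:
--             lo = mid + 1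
--         else:
--             hi = mid
--     return lo
--
--
-- def get_outside_warning_zones(mul: dict, warning_list: list) -> list:
--     iv = sorted(((w[0], w[1]) for w in warning_list), key=lambda p: p[0])
--     merged = []
--     if iv:
--         cur_lo, cur_hi = iv[0]
--         for lo, hi in iv[1:]:
--             if lo < cur_hi:
--                 if hi > cur_hi:
--                     cur_hi = hi
--             else:
--                 merged.append((cur_lo, cur_hi))
--                 cur_lo, cur_hi = lo, hi
--         merged.append((cur_lo, cur_hi))
--     starts = [p[0] for p in merged]
--     ends = [p[1] for p in merged]
--     final = []
--     for m, v in mul.items():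
--         x = v[0]
--         i = _bisect_left(starts, x)
--         if not (i > 0 and x < ends[i - 1]):
--             final.append(m)
--     return final
-- ===== Notes on version B (the rewrite author's own statement) =====
-- stated objective: faster
-- what changed: Instead of testing every point against every warning interval with an inner break-loop, B sorts the warning intervals once, merges them into a disjoint ordered list, and locates each point with a hand-written binary search over the merged starts.
-- outside the precondition, e.g. on get_outside_warning_zones({1: [0]}, [[5]]): A returns [1], B raises IndexError; on get_outside_warning_zones({1: []}, []): A returns [1], B raises IndexError
import Mathlib
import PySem

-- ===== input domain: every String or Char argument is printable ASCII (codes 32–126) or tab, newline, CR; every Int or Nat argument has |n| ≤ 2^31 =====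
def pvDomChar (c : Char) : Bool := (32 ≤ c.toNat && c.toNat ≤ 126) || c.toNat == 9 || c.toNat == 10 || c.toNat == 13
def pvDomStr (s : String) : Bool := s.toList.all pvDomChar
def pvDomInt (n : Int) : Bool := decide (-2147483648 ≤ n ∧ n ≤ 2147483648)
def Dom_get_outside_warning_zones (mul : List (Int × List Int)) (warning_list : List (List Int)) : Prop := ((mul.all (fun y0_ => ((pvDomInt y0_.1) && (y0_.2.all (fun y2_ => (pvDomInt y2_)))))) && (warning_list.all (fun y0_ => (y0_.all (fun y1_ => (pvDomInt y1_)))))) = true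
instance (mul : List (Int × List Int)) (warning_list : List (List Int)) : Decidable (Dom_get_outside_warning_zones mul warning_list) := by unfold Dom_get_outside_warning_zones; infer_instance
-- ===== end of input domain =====

-- ===== PORT A =====
-- B replaces A's per-point scan over all warning intervals by a sort-merge of the
-- intervals plus a binary search per point (objective: faster, asymptotic).
-- inner 'for w_l in warning_list' with break; pyGetD is exact under Pre_ (indices in range)
def aInner (x : Int) : List (List Int) → Bool
  | [] => true
  | w :: rest =>
    if PySem.List.pyGetD w 0 0 < x ∧ x < PySem.List.pyGetD w 1 0 then false else aInner x rest

def get_outside_warning_zones (mul : List (Int × List Int)) (warning_list : List (List Int)) : List Int :=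
  -- 'for m in mul: … mul[m][0] …'; mul[m] = first-match lookup in the association list
  mul.foldl (fun final p =>
    if aInner (PySem.List.pyGetD ((List.lookup p.1 mul).getD []) 0 0) warning_list
    then final ++ [p.1] else final) []

-- ===== PORT B =====
-- hand-written _bisect_left of Source B, step for step
def bBisect (starts : List Int) (x : Int) (lo hi : Nat) : Nat :=
  if lo < hi then
    let mid := (lo + hi) / 2
    if starts.getD mid 0 < x then bBisect starts x (mid + 1) hi
    else bBisect starts x lo mid
  else lo
termination_by hi - lo
decreasing_by all_goals omega

-- Source B's merge loop over iv[1:], carrying the current interval (cur_lo, cur_hi)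
def bMergeGo (clo chi : Int) : List (Int × Int) → List (Int × Int)
  | [] => [(clo, chi)]
  | q :: rest =>
    if q.1 < chi then bMergeGo clo (if chi < q.2 then q.2 else chi) rest
    else (clo, chi) :: bMergeGo q.1 q.2 rest

-- the whole merge phase of Source B: empty iv gives merged = [], else run the loop
def bMerge (iv : List (Int × Int)) : List (Int × Int) :=
  match iv with
  | [] => []
  | q :: rest => bMergeGo q.1 q.2 rest

def get_outside_warning_zones_alt (mul : List (Int × List Int)) (warning_list : List (List Int)) : List Int :=
  let merged := bMerge (PySem.List.sorted (warning_list.map (fun w => (PySem.List.pyGetD w 0 0, PySem.List.pyGetD w 1 0))) (fun p => p.1) false)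
  let starts := merged.map (fun p => p.1)
  let ends := merged.map (fun p => p.2)
  mul.foldl (fun final p =>
    let x := PySem.List.pyGetD p.2 0 0
    let i := bBisect starts x 0 starts.length
    if ¬ (0 < i ∧ x < ends.getD (i - 1) 0) then final ++ [p.1] else final) []

-- ===== PRECONDITION & SPEC =====
-- Pre_ excludes inputs where B's unconditional v[0]/w[1] indexing raises while A's
-- short-circuit may still return (empty point lists, warning lists shorter than 2),
-- and association lists with duplicate keys, which no Python dict can represent.
def Pre_get_outside_warning_zones (mul : List (Int × List Int)) (warning_list : List (List Int)) : Prop :=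
  (∀ p ∈ mul, p.2 ≠ []) ∧ (∀ w ∈ warning_list, 2 ≤ w.length) ∧ (mul.map Prod.fst).Nodup
instance (mul : List (Int × List Int)) (warning_list : List (List Int)) : Decidable (Pre_get_outside_warning_zones mul warning_list) := by unfold Pre_get_outside_warning_zones; infer_instance

def pvWitness_get_outside_warning_zones : (List (Int × List Int)) × List (List Int) :=
  ([(1, [3]), (2, [10])], [[0, 5], [4, 6]])

def Spec_get_outside_warning_zones (mul : List (Int × List Int)) (warning_list : List (List Int)) (out : List Int) : Prop := out = get_outside_warning_zones_alt mul warning_list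
instance (mul : List (Int × List Int)) (warning_list : List (List Int)) (out : List Int) : Decidable (Spec_get_outside_warning_zones mul warning_list out) := by unfold Spec_get_outside_warning_zones; infer_instance

-- ===== CLAIM (what is proved, stated in full; the proofs are below) =====
def Claim_equal_get_outside_warning_zones : Prop := ∀ (mul : List (Int × List Int)) (warning_list : List (List Int)), Dom_get_outside_warning_zones mul warning_list → Pre_get_outside_warning_zones mul warning_list → Spec_get_outside_warning_zones mul warning_list (get_outside_warning_zones mul warning_list)

-- ===== LEMMAS AND PROOFS =====

theorem aInner_eq_true_iff (x : Int) (wl : List (List Int)) :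
    aInner x wl = true ↔ ∀ w ∈ wl, ¬ (PySem.List.pyGetD w 0 0 < x ∧ x < PySem.List.pyGetD w 1 0) := by
  induction wl with
  | nil => simp [aInner]
  | cons w rest ih =>
    simp only [aInner, List.mem_cons]
    split_ifs with h
    · simp only [false_iff]
      intro hall
      exact hall w (Or.inl rfl) h
    · rw [ih]
      constructor
      · intro hall v hv
        rcases hv with rfl | hv
        · exact h
        · exact hall v hv
      · intro hall v hv
        exact hall v (Or.inr hv)

theorem bMergeGo_firsts (clo chi : Int) (rest : List (Int × Int)) :
    ∀ p ∈ bMergeGo clo chi rest, p.1 = clo ∨ p.1 ∈ rest.map Prod.fst := by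
  induction rest generalizing clo chi with
  | nil => simp [bMergeGo]
  | cons q rest ih =>
    intro p hp
    simp only [bMergeGo] at hp
    by_cases h : q.1 < chi
    · rw [if_pos h] at hp
      rcases ih _ _ p hp with h1 | h1
      · exact Or.inl h1
      · exact Or.inr (by simp [h1])
    · rw [if_neg h] at hp
      rcases List.mem_cons.mp hp with rfl | hp
      · exact Or.inl rfl
      · rcases ih _ _ p hp with h1 | h1
        · exact Or.inr (by simp [h1])
        · exact Or.inr (by simp [h1])

theorem bMergeGo_pairwise (rest : List (Int × Int)) : ∀ (clo chi : Int),
    rest.Pairwise (fun a b => a.1 ≤ b.1) → (∀ q ∈ rest, clo ≤ q.1) →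
    (bMergeGo clo chi rest).Pairwise (fun p q => p.2 ≤ q.1 ∧ p.1 ≤ q.1) := by
  induction rest with
  | nil => intro clo chi _ _; simp [bMergeGo]
  | cons q rest ih =>
    intro clo chi hpw hle
    rw [List.pairwise_cons] at hpw
    have hq : clo ≤ q.1 := hle q (List.mem_cons_self)
    simp only [bMergeGo]
    by_cases h : q.1 < chi
    · rw [if_pos h]
      exact ih clo _ hpw.2 (fun r hr => le_trans hq (hpw.1 r hr))
    · rw [if_neg h]
      refine List.pairwise_cons.mpr ⟨?_, ih q.1 q.2 hpw.2 hpw.1⟩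
      intro r hr
      rcases bMergeGo_firsts q.1 q.2 rest r hr with h1 | h1
      · exact ⟨by omega, by omega⟩
      · obtain ⟨rr, hrr, hfst⟩ := List.mem_map.mp h1
        have := hpw.1 rr hrr
        exact ⟨by omega, by omega⟩

theorem bMergeGo_cover (x : Int) (rest : List (Int × Int)) : ∀ (clo chi : Int),
    rest.Pairwise (fun a b => a.1 ≤ b.1) → (∀ q ∈ rest, clo ≤ q.1) →
    ((∃ p ∈ bMergeGo clo chi rest, p.1 < x ∧ x < p.2) ↔
      ((clo < x ∧ x < chi) ∨ ∃ q ∈ rest, q.1 < x ∧ x < q.2)) := by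
  induction rest with
  | nil => intro clo chi _ _; simp [bMergeGo]
  | cons q rest ih =>
    intro clo chi hpw hle
    rw [List.pairwise_cons] at hpw
    have hq : clo ≤ q.1 := hle q (List.mem_cons_self)
    simp only [bMergeGo]
    by_cases h : q.1 < chi
    · rw [if_pos h]
      rw [ih clo _ hpw.2 (fun r hr => le_trans hq (hpw.1 r hr))]
      have harith : (clo < x ∧ x < (if chi < q.2 then q.2 else chi)) ↔
          ((clo < x ∧ x < chi) ∨ (q.1 < x ∧ x < q.2)) := by
        split_ifs <;> omega
      rw [harith, List.exists_mem_cons_iff]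
      exact or_assoc
    · rw [if_neg h]
      rw [List.exists_mem_cons_iff, List.exists_mem_cons_iff]
      rw [ih q.1 q.2 hpw.2 hpw.1]

theorem pairwise_getD_mono (l : List Int) (h : l.Pairwise (· ≤ ·)) (a b : Nat)
    (hab : a ≤ b) (hb : b < l.length) : l.getD a 0 ≤ l.getD b 0 := by
  rcases Nat.lt_or_ge a b with hlt | hge
  · have := (List.pairwise_iff_getElem.mp h) a b (by omega) hb hlt
    rw [List.getD_eq_getElem l 0 (by omega), List.getD_eq_getElem l 0 hb]
    exact this
  · have : a = b := by omega
    subst this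
    exact le_refl _

theorem bBisect_spec (starts : List Int) (x : Int) (lo hi : Nat)
    (hsort : starts.Pairwise (· ≤ ·)) (hhi : hi ≤ starts.length) (hlohi : lo ≤ hi)
    (hlo : ∀ j < lo, starts.getD j 0 < x)
    (hge : ∀ j, hi ≤ j → j < starts.length → x ≤ starts.getD j 0) :
    (∀ j < bBisect starts x lo hi, starts.getD j 0 < x) ∧
    (∀ j, bBisect starts x lo hi ≤ j → j < starts.length → x ≤ starts.getD j 0) ∧
    bBisect starts x lo hi ≤ hi ∧ lo ≤ bBisect starts x lo hi := by
  have main : ∀ n lo hi, hi - lo ≤ n → hi ≤ starts.length → lo ≤ hi →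
      (∀ j < lo, starts.getD j 0 < x) →
      (∀ j, hi ≤ j → j < starts.length → x ≤ starts.getD j 0) →
      ((∀ j < bBisect starts x lo hi, starts.getD j 0 < x) ∧
       (∀ j, bBisect starts x lo hi ≤ j → j < starts.length → x ≤ starts.getD j 0) ∧
       bBisect starts x lo hi ≤ hi ∧ lo ≤ bBisect starts x lo hi) := by
    intro n
    induction n with
    | zero =>
      intro lo hi hn hhi' hlohi' hlo' hge'
      rw [bBisect, if_neg (by omega)]
      exact ⟨hlo', fun j hj hjl => hge' j (by omega) hjl, by omega, le_refl _⟩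
    | succ n ihn =>
      intro lo hi hn hhi' hlohi' hlo' hge'
      by_cases h1 : lo < hi
      · rw [bBisect]
        simp only [if_pos h1]
        split_ifs with hm
        · obtain ⟨A, B, C, D⟩ := ihn ((lo + hi) / 2 + 1) hi (by omega) hhi' (by omega)
            (by
              intro j hj
              by_cases hjlo : j < lo
              · exact hlo' j hjlo
              · have hmono := pairwise_getD_mono starts hsort j ((lo + hi) / 2) (by omega) (by omega)
                omega)
            hge'
          exact ⟨A, B, C, by omega⟩
        · obtain ⟨A, B, C, D⟩ := ihn lo ((lo + hi) / 2) (by omega) (by omega) (by omega) hlo'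
            (by
              intro j hj hjlen
              have hmono := pairwise_getD_mono starts hsort ((lo + hi) / 2) j hj hjlen
              omega)
          exact ⟨A, B, by omega, D⟩
      · rw [bBisect, if_neg h1]
        exact ⟨hlo', fun j hj hjl => hge' j (by omega) hjl, by omega, le_refl _⟩
  exact main (hi - lo) lo hi (le_refl _) hhi hlohi hlo hge

theorem query_iff (merged : List (Int × Int)) (x : Int)
    (hpw : merged.Pairwise (fun p q => p.2 ≤ q.1 ∧ p.1 ≤ q.1)) :
    (0 < bBisect (merged.map (fun p => p.1)) x 0 (merged.map (fun p => p.1)).length ∧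
      x < (merged.map (fun p => p.2)).getD (bBisect (merged.map (fun p => p.1)) x 0 (merged.map (fun p => p.1)).length - 1) 0) ↔
    ∃ p ∈ merged, p.1 < x ∧ x < p.2 := by
  have hlen : (merged.map (fun p => p.1)).length = merged.length := by simp
  have hsget : ∀ j (h : j < merged.length), (merged.map (fun p => p.1)).getD j 0 = (merged[j]'h).1 := by
    intro j h
    rw [List.getD_eq_getElem _ 0 (by simpa using h)]
    simp
  have heget : ∀ j (h : j < merged.length), (merged.map (fun p => p.2)).getD j 0 = (merged[j]'h).2 := by
    intro j h
    rw [List.getD_eq_getElem _ 0 (by simpa using h)]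
    simp
  obtain ⟨A, B, C, D⟩ := bBisect_spec (merged.map (fun p => p.1)) x 0 (merged.map (fun p => p.1)).length
    (by
      rw [List.pairwise_map]
      exact hpw.imp (fun h => h.2))
    (le_refl _) (Nat.zero_le _)
    (by intro j hj; omega)
    (by intro j hj hjl; omega)
  set i := bBisect (merged.map (fun p => p.1)) x 0 (merged.map (fun p => p.1)).length with hidef
  constructor
  · rintro ⟨hi0, hxe⟩
    have him : i - 1 < merged.length := by omega
    refine ⟨merged[i-1], List.getElem_mem _, ?_, ?_⟩
    · have := A (i - 1) (by omega)
      rwa [hsget (i - 1) him] at this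
    · rwa [heget (i - 1) him] at hxe
  · rintro ⟨p, hp, hp1, hp2⟩
    obtain ⟨j, hj, rfl⟩ := List.getElem_of_mem hp
    have hjlt : j < i := by
      by_contra hge2
      have hB := B j (by omega) (by omega)
      rw [hsget j hj] at hB
      omega
    have hi0 : 0 < i := by omega
    have him : i - 1 < merged.length := by omega
    have hj1 : j = i - 1 := by
      by_contra hne
      have hji : j < i - 1 := by omega
      have hA := A (i - 1) (by omega)
      rw [hsget (i - 1) him] at hA
      have hpair := (List.pairwise_iff_getElem.mp hpw) j (i - 1) hj him hji
      omega
    subst hj1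
    refine ⟨hi0, ?_⟩
    rw [heget (i - 1) him]
    exact hp2

theorem lookup_of_nodup (mul : List (Int × List Int)) (p : Int × List Int)
    (hnd : (mul.map Prod.fst).Nodup) (hp : p ∈ mul) : List.lookup p.1 mul = some p.2 := by
  induction mul with
  | nil => simp at hp
  | cons q rest ih =>
    obtain ⟨qk, qv⟩ := q
    rcases List.mem_cons.mp hp with rfl | hp2
    · simp [List.lookup]
    · have hnd' := List.nodup_cons.mp (show (qk :: rest.map Prod.fst).Nodup by simpa only [List.map_cons] using hnd)
      have hbe : (p.1 == qk) = false := by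
        rw [beq_eq_false_iff_ne]
        intro he
        exact hnd'.1 (he ▸ List.mem_map_of_mem hp2)
      simp only [List.lookup, hbe]
      exact ih hnd'.2 hp2

theorem bMerge_pairwise (iv : List (Int × Int)) (hiv : iv.Pairwise (fun a b => a.1 ≤ b.1)) :
    (bMerge iv).Pairwise (fun p q => p.2 ≤ q.1 ∧ p.1 ≤ q.1) := by
  cases iv with
  | nil => simp [bMerge]
  | cons q rest =>
    rw [List.pairwise_cons] at hiv
    exact bMergeGo_pairwise rest q.1 q.2 hiv.2 hiv.1

theorem exists_merged_iff (wl : List (List Int)) (x : Int) :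
    (∃ p ∈ bMerge (PySem.List.sorted (wl.map (fun w => (PySem.List.pyGetD w 0 0, PySem.List.pyGetD w 1 0))) (fun p => p.1) false), p.1 < x ∧ x < p.2)
    ↔ ∃ w ∈ wl, PySem.List.pyGetD w 0 0 < x ∧ x < PySem.List.pyGetD w 1 0 := by
  have hstep : ∀ (ps : List (Int × Int)),
      (∃ p ∈ bMerge (PySem.List.sorted ps (fun p => p.1) false), p.1 < x ∧ x < p.2) ↔
        ∃ p ∈ ps, p.1 < x ∧ x < p.2 := by
    intro ps
    have hivpw := PySem.List.sorted_pairwise (xs := ps) (key := fun p => p.1)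
    cases hiveq : PySem.List.sorted ps (fun p => p.1) false with
    | nil =>
      constructor
      · rintro ⟨p, hp, _⟩
        simp [bMerge] at hp
      · rintro ⟨p, hp, hP⟩
        have h2 : p ∈ PySem.List.sorted ps (fun p => p.1) false := (PySem.List.mem_sorted _ _ _ _).mpr hp
        rw [hiveq] at h2
        simp at h2
    | cons q rest =>
      rw [hiveq] at hivpw
      rw [List.pairwise_cons] at hivpw
      simp only [bMerge]
      rw [bMergeGo_cover x rest q.1 q.2 hivpw.2 hivpw.1]
      constructor
      · rintro (hq | ⟨p, hp, hP⟩)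
        · exact ⟨q, (PySem.List.mem_sorted _ _ _ _).mp (by rw [hiveq]; exact List.mem_cons_self), hq⟩
        · exact ⟨p, (PySem.List.mem_sorted _ _ _ _).mp (by rw [hiveq]; exact List.mem_cons_of_mem q hp), hP⟩
      · rintro ⟨p, hp, hP⟩
        have h2 : p ∈ q :: rest := by
          rw [← hiveq]
          exact (PySem.List.mem_sorted _ _ _ _).mpr hp
        rcases List.mem_cons.mp h2 with rfl | hp2
        · exact Or.inl hP
        · exact Or.inr ⟨p, hp2, hP⟩
  rw [hstep]
  constructor
  · rintro ⟨p, hp, hP⟩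
    obtain ⟨w, hw, rfl⟩ := List.mem_map.mp hp
    exact ⟨w, hw, hP⟩
  · rintro ⟨w, hw, hP⟩
    exact ⟨(PySem.List.pyGetD w 0 0, PySem.List.pyGetD w 1 0), List.mem_map_of_mem hw, hP⟩

-- ===== VERDICT (by name: the statement is the Claim_ definition above) =====
theorem get_outside_warning_zones_spec : Claim_equal_get_outside_warning_zones := by
  intro mul wl hdom hpre
  obtain ⟨hvne, hwlen, hnd⟩ := hpre
  unfold Spec_get_outside_warning_zones
  rw [get_outside_warning_zones, get_outside_warning_zones_alt]
  apply PySem.List.foldl_congr_mem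
  intro acc p hp
  dsimp only
  rw [lookup_of_nodup mul p hnd hp]
  simp only [Option.getD_some]
  refine if_congr ?_ rfl rfl
  rw [aInner_eq_true_iff]
  rw [query_iff _ _ (bMerge_pairwise _ (PySem.List.sorted_pairwise (xs := wl.map (fun w => (PySem.List.pyGetD w 0 0, PySem.List.pyGetD w 1 0))) (key := fun p => p.1)))]
  rw [exists_merged_iff]
  constructor
  · rintro hall ⟨w, hw, hP⟩
    exact hall w hw hP
  · intro hne w hw hP
    exact hne ⟨w, hw, hP⟩
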